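-- pv_equiv track=rewrite | github.com/zombielabsv2/lotus-lane | pipeline/video_generator.py | _clean_dialogue_text
-- ===== SOURCE A (Python) =====
-- def _clean_dialogue_text(text):
--     """Remove stage directions in parentheses from dialogue text."""
--     cleaned = text.strip()
--     # Remove leading parenthetical like "(sighs)" or "(thinking)"
--     while cleaned.startswith("("):
--         paren_end = cleaned.find(")")
--         if paren_end > 0:
--             cleaned = cleaned[paren_end + 1:].strip()
--         else:
--             break
--     # Remove trailing ellipsis that might truncate
--     return cleaned
-- ===== SOURCE B (Python) =====
-- def _clean_dialogue_text(text):
--     """Remove stage directions in parentheses from dialogue text."""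
--     s = text.strip()
--     n = len(s)
--     i = 0
--     while i < n and s[i] == "(":
--         j = i + 1
--         while j < n and s[j] != ")":
--             j += 1
--         if j == n:
--             break
--         i = j + 1
--         while i < n and s[i].isspace():
--             i += 1
--     return s[i:]
-- ===== Notes on version B (the rewrite author's own statement) =====
-- stated objective: alternative
-- what changed: A repeatedly rebuilds the remaining string with slice and strip for every leading parenthetical group; B makes a single left-to-right index scan over the stripped string, advancing past each closed group and the following whitespace, and slices once at the end.
import Mathlib
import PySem

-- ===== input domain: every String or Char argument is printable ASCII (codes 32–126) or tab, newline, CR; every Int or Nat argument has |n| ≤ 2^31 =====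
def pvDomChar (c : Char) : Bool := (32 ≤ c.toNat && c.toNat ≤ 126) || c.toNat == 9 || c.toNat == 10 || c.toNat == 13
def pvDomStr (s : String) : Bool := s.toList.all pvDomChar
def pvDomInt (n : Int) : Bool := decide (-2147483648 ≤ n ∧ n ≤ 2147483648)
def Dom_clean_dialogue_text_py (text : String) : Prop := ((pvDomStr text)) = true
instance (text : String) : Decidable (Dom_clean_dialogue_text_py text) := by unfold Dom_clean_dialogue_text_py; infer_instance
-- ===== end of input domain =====

-- B replaces A's repeated slice-and-strip of the remaining string by a single left-to-right
-- scan that only advances a position, with one final slice (objective: alternative algorithm).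


-- ===== PORT A =====
-- length bound used only for the termination of aLoop
theorem pvStripLenLe (cs : List Char) : (PySem.Chars.strip cs).length ≤ cs.length := by
  simp only [PySem.Chars.strip, PySem.Chars.lstrip, PySem.Chars.rstrip, List.length_reverse]
  calc (List.dropWhile PySem.Chars.isspace (List.dropWhile PySem.Chars.isspace cs).reverse).length
      ≤ (List.dropWhile PySem.Chars.isspace cs).reverse.length := List.length_dropWhile_le _ _
    _ ≤ cs.length := by simpa using List.length_dropWhile_le PySem.Chars.isspace cs

-- the while-loop of A, on the character list (state = the current `cleaned`)
def aLoop (cs : List Char) : List Char :=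
  if h : PySem.Chars.startswith cs ['('] = true then
    let paren_end := PySem.Chars.find cs [')']
    if hp : paren_end > 0 then
      aLoop (PySem.Chars.strip (PySem.Chars.slice cs (some (paren_end + 1)) none))
    else cs
  else cs
termination_by cs.length
decreasing_by
  have hcs : cs ≠ [] := by
    rcases (PySem.Chars.startswith_iff cs ['(']).mp h with ⟨t, ht⟩
    intro hnil; rw [hnil] at ht; exact absurd ht.symm (by simp)
  have hslice : PySem.Chars.slice cs (some (PySem.Chars.find cs [')'] + 1)) none
      = cs.drop (PySem.Chars.find cs [')'] + 1).toNat := by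
    simpa [PySem.Chars.slice_eq_listSlice] using
      PySem.List.slice_from cs (a := PySem.Chars.find cs [')'] + 1) (by omega)
  have h1 : 1 ≤ (PySem.Chars.find cs [')'] + 1).toNat := by omega
  calc (PySem.Chars.strip (PySem.Chars.slice cs (some (PySem.Chars.find cs [')'] + 1)) none)).length
      ≤ (PySem.Chars.slice cs (some (PySem.Chars.find cs [')'] + 1)) none).length := pvStripLenLe _
    _ = cs.length - (PySem.Chars.find cs [')'] + 1).toNat := by rw [hslice, List.length_drop]
    _ < cs.length := by
        have : 0 < cs.length := List.length_pos_iff.mpr hcs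
        omega

def clean_dialogue_text_py (text : String) : String :=
  String.ofList (aLoop (PySem.Chars.strip text.toList))

-- ===== PORT B =====
-- B's inner scan `j = i+1; while j < n and s[j] != ')': j += 1`: the state s[j:] as a suffix;
-- returns the suffix after the first ')' (none = no ')' before the end, B breaks)
def bFindClose : List Char → Option (List Char)
  | [] => none
  | c :: rest => if c = ')' then some rest else bFindClose rest

theorem pvBFindLen : ∀ (cs after : List Char), bFindClose cs = some after → after.length < cs.length := by
  intro cs
  induction cs with
  | nil => intro after h; simp [bFindClose] at h
  | cons c rest ih =>
    intro after h
    by_cases hc : c = ')'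
    · simp [bFindClose, hc] at h; subst h; simp
    · simp [bFindClose, hc] at h
      exact Nat.lt_succ_of_lt (ih after h)

-- B's outer loop: the state s[i:] as a suffix of the stripped text
def bLoop (cs : List Char) : List Char :=
  match cs with
  | [] => []
  | c :: rest =>
    if c = '(' then
      match hf : bFindClose rest with
      | some after => bLoop (after.dropWhile PySem.Chars.isspace)
      | none => c :: rest
    else c :: rest
termination_by cs.length
decreasing_by
  calc (after.dropWhile PySem.Chars.isspace).length ≤ after.length := List.length_dropWhile_le _ _
    _ < rest.length := pvBFindLen rest after hf
    _ < (c :: rest).length := by simp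

def clean_dialogue_text_py_alt (text : String) : String :=
  String.ofList (bLoop (PySem.Chars.strip text.toList))

-- ===== PRECONDITION & SPEC =====
def Spec_clean_dialogue_text_py (text : String) (out : String) : Prop := out = clean_dialogue_text_py_alt text
instance (text : String) (out : String) : Decidable (Spec_clean_dialogue_text_py text out) := by unfold Spec_clean_dialogue_text_py; infer_instance

-- ===== CLAIM (what is proved, stated in full; the proofs are below) =====
def Claim_equal_clean_dialogue_text_py : Prop := ∀ (text : String), Dom_clean_dialogue_text_py text → Spec_clean_dialogue_text_py text (clean_dialogue_text_py text)

-- ===== LEMMAS AND PROOFS =====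

theorem bLoop_nil : bLoop [] = [] := by rw [bLoop]

theorem bLoop_cons_some (rest after : List Char) (h : bFindClose rest = some after) :
    bLoop ('(' :: rest) = bLoop (after.dropWhile PySem.Chars.isspace) := by
  rw [bLoop, if_pos rfl]
  split
  · next a heq => rw [h] at heq; cases heq; rfl
  · next heq => rw [h] at heq; cases heq

theorem bLoop_cons_none (rest : List Char) (h : bFindClose rest = none) :
    bLoop ('(' :: rest) = '(' :: rest := by
  rw [bLoop, if_pos rfl]
  split
  · next a heq => rw [h] at heq; cases heq
  · rfl

theorem bLoop_cons_ne (c : Char) (rest : List Char) (hc : ¬ c = '(') :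
    bLoop (c :: rest) = c :: rest := by
  rw [bLoop, if_neg hc]

theorem bFindClose_eq_none_iff (cs : List Char) : bFindClose cs = none ↔ ')' ∉ cs := by
  induction cs with
  | nil => simp [bFindClose]
  | cons c rest ih =>
    by_cases hc : c = ')'
    · simp [bFindClose, hc]
    · simp [bFindClose, hc, ih, Ne.symm hc]

theorem bFindClose_of_first (cs : List Char) (t : Nat) (ht : t < cs.length)
    (hat : cs[t]? = some ')') (hbefore : ∀ i, i < t → cs[i]? ≠ some ')') :
    bFindClose cs = some (cs.drop (t + 1)) := by
  induction cs generalizing t with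
  | nil => simp at ht
  | cons c rest ih =>
    cases t with
    | zero =>
      simp at hat
      simp [bFindClose, hat]
    | succ t' =>
      have hc : c ≠ ')' := by
        have := hbefore 0 (Nat.succ_pos t')
        simpa using this
      simp only [bFindClose, if_neg hc]
      have ih' := ih t' (by simpa using ht) (by simpa using hat)
        (by intro i hi; have := hbefore (i + 1) (by omega); simpa using this)
      rw [ih']
      simp

-- the core: on a list with no trailing whitespace the two loops agree
theorem pvRstripSuffix (cs s : List Char) (hr : PySem.Chars.rstrip cs = cs) (hs : s <:+ cs) :
    PySem.Chars.rstrip s = s := by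
  simp only [PySem.Chars.rstrip] at hr ⊢
  have hrev : s.reverse <+: cs.reverse := List.reverse_prefix.mpr hs
  have hcs : List.dropWhile PySem.Chars.isspace cs.reverse = cs.reverse := by
    have := congrArg List.reverse hr
    simpa using this
  rcases hrev with ⟨t, htc⟩
  cases hsr : s.reverse with
  | nil => simp [List.reverse_eq_nil_iff.mp hsr]
  | cons a l =>
    have ha : ¬ PySem.Chars.isspace a = true := by
      rw [hsr] at htc
      have := hcs
      rw [← htc] at this
      by_contra hsp
      simp only [List.cons_append, List.dropWhile_cons, hsp, if_pos] at this
      have hlen : (List.dropWhile PySem.Chars.isspace (l ++ t)).length = l.length + t.length + 1 := by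
        rw [this]; simp
      have hle := List.length_dropWhile_le PySem.Chars.isspace (l ++ t)
      rw [List.length_append] at hle
      omega
    simp only [List.dropWhile_cons, ha, if_neg, Bool.not_eq_true]
    simp [← hsr]

theorem singleton_prefix_iff (a : Char) (l : List Char) : [a] <+: l ↔ l.head? = some a := by
  cases l with
  | nil => simp
  | cons b t =>
    constructor
    · rintro ⟨u, hu⟩
      simp at hu
      simp [hu.1]
    · intro h
      simp at h
      exact ⟨t, by simp [h]⟩

theorem pvLoopsAgree : ∀ n (cs : List Char), cs.length ≤ n →
    PySem.Chars.rstrip cs = cs → aLoop cs = bLoop cs := by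
  intro n
  induction n with
  | zero =>
    intro cs hlen _
    have : cs = [] := List.eq_nil_of_length_eq_zero (Nat.le_zero.mp hlen)
    subst this
    rw [aLoop, bLoop_nil]
    simp [PySem.Chars.startswith]
  | succ m ih =>
    intro cs hlen hr
    match cs with
    | [] => rw [aLoop, bLoop_nil]; simp [PySem.Chars.startswith]
    | c :: rest =>
      by_cases hc : c = '('
      · subst hc
        have hsw : PySem.Chars.startswith ('(' :: rest) ['('] = true := by
          rw [PySem.Chars.startswith_iff]; exact ⟨rest, rfl⟩
        by_cases hmem : ')' ∈ rest
        · -- a close paren exists: both loops jump past the first ')'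
          have hmem' : ')' ∈ '(' :: rest := List.mem_cons_of_mem _ hmem
          have hfind_ne : PySem.Chars.find ('(' :: rest) [')'] ≠ -1 := by
            rw [Ne, PySem.Chars.find_eq_neg_one_iff]
            intro hno
            exact hno ((List.singleton_infix_iff _ _).mpr hmem')
          have hge : 0 ≤ PySem.Chars.find ('(' :: rest) [')'] := by
            have := PySem.Chars.neg_one_le_find ('(' :: rest) [')']
            omega
          obtain ⟨hpre, hmin⟩ := PySem.Chars.find_spec (s := '(' :: rest) (sub := [')']) hge
          set t := (PySem.Chars.find ('(' :: rest) [')']).toNat with htdef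
          have htlt : t < ('(' :: rest).length := by
            rcases (singleton_prefix_iff _ _).mp hpre with h
            by_contra hge'
            rw [List.drop_eq_nil_of_le (by omega)] at h
            simp at h
          have hat : ('(' :: rest)[t]? = some ')' := by
            have h := (singleton_prefix_iff _ _).mp hpre
            rwa [List.head?_drop] at h
          have hbefore : ∀ i, i < t → ('(' :: rest)[i]? ≠ some ')' := by
            intro i hi hcontra
            apply hmin i hi
            rw [singleton_prefix_iff, List.head?_drop]
            exact hcontra
          have ht0 : t ≠ 0 := by
            intro h0
            have := hat
            rw [h0] at this
            simp at this
          have hpos : PySem.Chars.find ('(' :: rest) [')'] > 0 := by omega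
          have hbf : bFindClose rest = some (('(' :: rest).drop (t + 1)) := by
            obtain ⟨t', ht'⟩ : ∃ t', t = t' + 1 := ⟨t - 1, by omega⟩
            have := bFindClose_of_first rest t' (by simp at htlt; omega)
              (by rw [ht'] at hat; simpa using hat)
              (by intro i hi
                  have := hbefore (i + 1) (by omega)
                  simpa using this)
            rw [this, ht']
            simp
          have hslice : PySem.Chars.slice ('(' :: rest) (some (PySem.Chars.find ('(' :: rest) [')'] + 1)) none
              = ('(' :: rest).drop (t + 1) := by
            rw [PySem.Chars.slice_eq_listSlice,
              PySem.List.slice_from ('(' :: rest) (a := PySem.Chars.find ('(' :: rest) [')'] + 1) (by omega)]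
            congr 1
            omega
          set after := ('(' :: rest).drop (t + 1) with hadef
          have hsuf : after <:+ ('(' :: rest) := List.drop_suffix _ _
          have hra : PySem.Chars.rstrip after = after := pvRstripSuffix _ _ hr hsuf
          have hstrip : PySem.Chars.strip after = after.dropWhile PySem.Chars.isspace := by
            have hsuf2 : after.dropWhile PySem.Chars.isspace <:+ ('(' :: rest) :=
              List.IsSuffix.trans (List.dropWhile_suffix _) hsuf
            simp only [PySem.Chars.strip, PySem.Chars.lstrip]
            exact pvRstripSuffix _ _ hr hsuf2
          rw [aLoop, dif_pos hsw]
          simp only [hslice, hstrip]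
          rw [dif_pos hpos]
          rw [bLoop_cons_some rest after hbf]
          apply ih
          · have h1 : after.length < ('(' :: rest).length := by
              rw [hadef, List.length_drop]
              simp
            have h2 := List.length_dropWhile_le PySem.Chars.isspace after
            simp only [List.length_cons] at hlen h1
            omega
          · exact pvRstripSuffix _ _ hr
              (List.IsSuffix.trans (List.dropWhile_suffix _) hsuf)
        · -- no close paren: both loops stop
          have hnomem : ')' ∉ '(' :: rest := by
            intro h
            rcases List.mem_cons.mp h with h | h
            · exact absurd h.symm (by decide)
            · exact hmem h
          have hfind : PySem.Chars.find ('(' :: rest) [')'] = -1 := by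
            rw [PySem.Chars.find_eq_neg_one_iff]
            intro hinf
            exact hnomem ((List.singleton_infix_iff _ _).mp hinf)
          rw [aLoop, dif_pos hsw]
          simp only [hfind]
          rw [dif_neg (by omega)]
          rw [bLoop_cons_none rest ((bFindClose_eq_none_iff rest).mpr hmem)]
      · -- does not start with '(' : both loops return the input
        have hsw : PySem.Chars.startswith (c :: rest) ['('] = false := by
          rw [← Bool.not_eq_true, PySem.Chars.startswith_iff]
          rintro ⟨u, hu⟩
          simp at hu
          exact hc hu.1.symm
        rw [aLoop, dif_neg (by simp [hsw]), bLoop_cons_ne c rest hc]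

theorem pvRstripStrip (cs : List Char) : PySem.Chars.rstrip (PySem.Chars.strip cs) = PySem.Chars.strip cs := by
  simp only [PySem.Chars.strip, PySem.Chars.rstrip, PySem.Chars.lstrip, List.reverse_reverse]
  rw [List.dropWhile_idempotent]

-- ===== VERDICT (by name: the statement is the Claim_ definition above) =====
theorem clean_dialogue_text_py_spec : Claim_equal_clean_dialogue_text_py := by
  intro text _
  unfold Spec_clean_dialogue_text_py clean_dialogue_text_py clean_dialogue_text_py_alt
  rw [pvLoopsAgree (PySem.Chars.strip text.toList).length _ le_rfl (pvRstripStrip _)]
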